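-- pv_equiv track=rewrite | github.com/miha42-github/company_dns | lib/rate_limiter.py | get_rate_limit_for_path
-- ===== SOURCE A (Python) =====
-- RATE_LIMITS = {
--     # Public documentation endpoints - higher limits
--     "docs": "1000/minute",
--
--     # SIC lookup endpoints - moderate limits
--     "sic": "200/minute",
--
--     # Company/firmographics endpoints - lower limits (more expensive queries)
--     "firmographics": "100/minute",
--
--     # EDGAR detail endpoints - stricter limits (database intensive)
--     "edgar_detail": "50/minute",
--
--     # Search/query endpoints - moderate limits
--     "search": "150/minute",
-- }
--
-- def get_rate_limit_for_path(path: str) -> str: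
--     """
--     Determine appropriate rate limit based on request path.
--
--     Args:
--         path: Request URL path
--
--     Returns:
--         Rate limit string (e.g., "100/minute")
--     """
--     path_lower = path.lower()
--
--     # Documentation paths
--     if any(doc_path in path_lower for doc_path in ['/docs', '/redoc', '/help']):
--         return RATE_LIMITS["docs"]
--
--     # Firmographics endpoints (most expensive)
--     if 'firmographics' in path_lower or 'merged' in path_lower:
--         return RATE_LIMITS["firmographics"]
--
--     # Detailed EDGAR endpoints
--     if '/edgar/detail' in path_lower or '/edgar/ciks' in path_lower:
--         return RATE_LIMITS["edgar_detail"]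
--
--     # SIC endpoints
--     if '/sic/' in path_lower:
--         return RATE_LIMITS["sic"]
--
--     # Default for all other endpoints
--     return "150/minute"
-- ===== SOURCE B (Python) =====
-- KEYWORD_RANKS = {
--     '/docs': 0, '/redoc': 0, '/help': 0,
--     'firmographics': 1, 'merged': 1,
--     '/edgar/detail': 2, '/edgar/ciks': 2,
--     '/sic/': 3,
-- }
-- LIMITS = ['1000/minute', '100/minute', '50/minute', '200/minute', '150/minute']
--
-- def get_rate_limit_for_path(path: str) -> str:
--     p = path.lower()
--     best = 4
--     for i in range(len(p)):
--         for kw, rank in KEYWORD_RANKS.items():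
--             if rank < best and p.startswith(kw, i):
--                 best = rank
--     return LIMITS[best]
-- ===== Notes on version B (the rewrite author's own statement) =====
-- stated objective: alternative
-- what changed: Instead of A's priority chain of whole-string substring membership tests with early returns, B scans the lowered path's offsets once, checks at each offset which keywords start there using a keyword-to-priority-rank map, keeps the minimum rank in an accumulator, and finally indexes a limits table by that rank.
import Mathlib
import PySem

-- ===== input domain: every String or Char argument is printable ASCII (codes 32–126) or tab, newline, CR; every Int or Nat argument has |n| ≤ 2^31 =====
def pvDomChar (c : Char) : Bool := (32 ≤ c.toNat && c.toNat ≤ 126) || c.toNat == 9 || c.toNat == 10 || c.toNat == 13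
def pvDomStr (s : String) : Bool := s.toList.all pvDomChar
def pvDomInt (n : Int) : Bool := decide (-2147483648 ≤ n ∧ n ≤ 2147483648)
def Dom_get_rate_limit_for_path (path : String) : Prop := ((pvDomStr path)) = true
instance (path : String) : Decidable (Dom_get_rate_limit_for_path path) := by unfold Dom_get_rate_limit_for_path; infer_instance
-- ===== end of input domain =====

-- B replaces A's priority chain of substring tests by one scan over the path's offsets that keeps
-- the minimum priority rank of any keyword starting there, then indexes a limits table (objective: alternative).

-- ===== PORT A =====
def get_rate_limit_for_path (path : String) : String :=
  let path_lower := PySem.Str.lower path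
  if [ "/docs", "/redoc", "/help" ].any (fun doc_path => PySem.Str.isIn doc_path path_lower) then
    "1000/minute"
  else if PySem.Str.isIn "firmographics" path_lower || PySem.Str.isIn "merged" path_lower then
    "100/minute"
  else if PySem.Str.isIn "/edgar/detail" path_lower || PySem.Str.isIn "/edgar/ciks" path_lower then
    "50/minute"
  else if PySem.Str.isIn "/sic/" path_lower then
    "200/minute"
  else
    "150/minute"

-- ===== PORT B =====
-- KEYWORD_RANKS dict, in insertion order (as an association list)
def pvKwRanks : List (String × Nat) :=
  [ ("/docs", 0), ("/redoc", 0), ("/help", 0),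
    ("firmographics", 1), ("merged", 1),
    ("/edgar/detail", 2), ("/edgar/ciks", 2),
    ("/sic/", 3) ]

def pvLimits : List String :=
  ["1000/minute", "100/minute", "50/minute", "200/minute", "150/minute"]

-- p.startswith(kw, i) for 0 ≤ i ≤ len(p): exact as kw prefix of p[i:]
def pvSW (pl : List Char) (i : Nat) (kw : String) : Bool :=
  PySem.Chars.startswith (pl.drop i) kw.toList

def get_rate_limit_for_path_alt (path : String) : String :=
  let pl := (PySem.Str.lower path).toList
  let best := (List.range pl.length).foldl
    (fun b i => pvKwRanks.foldl
      (fun b kr => if kr.2 < b ∧ pvSW pl i kr.1 then kr.2 else b) b) 4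
  -- LIMITS[best]: best ≤ 4 always, so getD with an unreachable default is exact
  pvLimits.getD best "150/minute"

-- ===== PRECONDITION & SPEC =====
def Spec_get_rate_limit_for_path (path : String) (out : String) : Prop := out = get_rate_limit_for_path_alt path
instance (path : String) (out : String) : Decidable (Spec_get_rate_limit_for_path path out) := by unfold Spec_get_rate_limit_for_path; infer_instance

-- ===== CLAIM (what is proved, stated in full; the proofs are below) =====
def Claim_equal_get_rate_limit_for_path : Prop := ∀ (path : String), Dom_get_rate_limit_for_path path → Spec_get_rate_limit_for_path path (get_rate_limit_for_path path)

-- ===== LEMMAS AND PROOFS =====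

-- the accumulator step, rewritten as a conditional min
def pvStep (b : Nat) (x : Nat × Bool) : Nat := if x.2 then min b x.1 else b

-- the flat list of (rank, matched-here) pairs B's nested loops traverse
def pvPairs (pl : List Char) : List (Nat × Bool) :=
  (List.range pl.length).flatMap (fun i => pvKwRanks.map (fun kr => (kr.2, pvSW pl i kr.1)))

theorem pvStep_eq (b : Nat) (kr : Nat × Bool) :
    (if kr.1 < b ∧ kr.2 then kr.1 else b) = pvStep b kr := by
  unfold pvStep
  rcases kr with ⟨r, c⟩
  cases c
  · simp
  · simp only [and_true]
    split_ifs <;> omega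

theorem pvBest_eq_pairs (pl : List Char) :
    (List.range pl.length).foldl
      (fun b i => pvKwRanks.foldl
        (fun b kr => if kr.2 < b ∧ pvSW pl i kr.1 then kr.2 else b) b) 4
    = (pvPairs pl).foldl pvStep 4 := by
  unfold pvPairs
  rw [List.foldl_flatMap]
  congr 1
  funext b i
  rw [List.foldl_map]
  congr 1
  funext b kr
  exact pvStep_eq b (kr.2, pvSW pl i kr.1)

theorem pvFoldl_step_le (l : List (Nat × Bool)) (b : Nat) : l.foldl pvStep b ≤ b := by
  induction l generalizing b with
  | nil => simp
  | cons hd tl ih =>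
    simp only [List.foldl_cons]
    calc tl.foldl pvStep (pvStep b hd) ≤ pvStep b hd := ih _
      _ ≤ b := by unfold pvStep; split <;> omega

theorem pvFoldl_step_le_mem (l : List (Nat × Bool)) (b : Nat) (r : Nat)
    (h : (r, true) ∈ l) : l.foldl pvStep b ≤ r := by
  induction l generalizing b with
  | nil => simp at h
  | cons hd tl ih =>
    simp only [List.foldl_cons]
    rcases List.mem_cons.1 h with h | h
    · calc tl.foldl pvStep (pvStep b hd) ≤ pvStep b hd := pvFoldl_step_le _ _
        _ ≤ r := by subst h; simp [pvStep]
    · exact ih _ h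

theorem pvFoldl_step_origin (l : List (Nat × Bool)) (b : Nat) :
    l.foldl pvStep b = b ∨ ∃ x ∈ l, x.2 = true ∧ l.foldl pvStep b = x.1 := by
  induction l generalizing b with
  | nil => simp
  | cons hd tl ih =>
    simp only [List.foldl_cons]
    rcases ih (pvStep b hd) with h | ⟨x, hx, hc, hv⟩
    · rcases hd with ⟨r, c⟩
      cases c with
      | false => left; simpa [pvStep] using h
      | true =>
        rcases Nat.le_total b r with hbr | hrb
        · left; rw [h]; simp [pvStep]; omega
        · right; exact ⟨(r, true), by simp, rfl, by rw [h]; simp [pvStep]; omega⟩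
    · right; exact ⟨x, List.mem_cons_of_mem _ hx, hc, hv⟩

-- matched pairs ↔ substring occurrence (for nonempty keywords)
theorem pvOcc_iff (kw : String) (hkw : kw.toList ≠ []) (pl : List Char) :
    (∃ i < pl.length, pvSW pl i kw = true) ↔ PySem.Chars.isIn kw.toList pl = true := by
  constructor
  · rintro ⟨i, _, hi⟩
    exact (PySem.Chars.exists_prefix_drop_iff_isIn _ _).1
      ⟨i, (PySem.Chars.startswith_iff _ _).1 hi⟩
  · intro h
    rcases (PySem.Chars.exists_prefix_drop_iff_isIn _ _).2 h with ⟨j, hj⟩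
    by_cases hlt : j < pl.length
    · exact ⟨j, hlt, (PySem.Chars.startswith_iff _ _).2 hj⟩
    · exfalso
      rw [List.drop_eq_nil_of_le (by omega)] at hj
      exact hkw (List.prefix_nil.1 hj)

-- which (rank, true) pairs can occur, grouped per rank
def pvMatched (pl : List Char) (r : Nat) : Prop :=
  ∃ kw, (kw, r) ∈ pvKwRanks ∧ PySem.Chars.isIn kw.toList pl = true

theorem pvPairs_mem_iff (pl : List Char) (r : Nat) :
    (r, true) ∈ pvPairs pl ↔ pvMatched pl r := by
  unfold pvPairs pvMatched
  simp only [List.mem_flatMap, List.mem_map, List.mem_range]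
  constructor
  · rintro ⟨i, hi, ⟨kw, rk⟩, hmem, heq⟩
    injection heq with h1 h2
    subst h1
    refine ⟨kw, hmem, ?_⟩
    have hne : kw.toList ≠ [] := by
      fin_cases hmem <;> simp
    exact (pvOcc_iff kw hne pl).1 ⟨i, hi, h2⟩
  · rintro ⟨kw, hmem, hin⟩
    have hne : kw.toList ≠ [] := by
      fin_cases hmem <;> simp
    rcases (pvOcc_iff kw hne pl).2 hin with ⟨i, hlt, hsw⟩
    exact ⟨i, hlt, (kw, r), hmem, by rw [hsw]⟩

theorem pvMatched_rank_lt (pl : List Char) (r : Nat) (h : (r, true) ∈ pvPairs pl) : r < 4 := by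
  rcases (pvPairs_mem_iff pl r).1 h with ⟨kw, hmem, _⟩
  fin_cases hmem <;> omega

-- per-rank bridges to A's conditions (pl = lowered path as chars)
theorem pvMatched0_iff (pl : List Char) :
    pvMatched pl 0 ↔ (PySem.Chars.isIn "/docs".toList pl = true ∨
      PySem.Chars.isIn "/redoc".toList pl = true ∨ PySem.Chars.isIn "/help".toList pl = true) := by
  unfold pvMatched pvKwRanks
  constructor
  · rintro ⟨kw, hmem, hin⟩
    simp only [List.mem_cons, List.not_mem_nil, or_false] at hmem
    rcases hmem with h | h | h | h | h | h | h | h <;> injection h with hk hr <;>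
      subst hk <;> first | omega | tauto
  · rintro (h | h | h)
    · exact ⟨"/docs", by simp, h⟩
    · exact ⟨"/redoc", by simp, h⟩
    · exact ⟨"/help", by simp, h⟩

theorem pvMatched1_iff (pl : List Char) :
    pvMatched pl 1 ↔ (PySem.Chars.isIn "firmographics".toList pl = true ∨
      PySem.Chars.isIn "merged".toList pl = true) := by
  unfold pvMatched pvKwRanks
  constructor
  · rintro ⟨kw, hmem, hin⟩
    simp only [List.mem_cons, List.not_mem_nil, or_false] at hmem
    rcases hmem with h | h | h | h | h | h | h | h <;> injection h with hk hr <;>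
      subst hk <;> first | omega | tauto
  · rintro (h | h)
    · exact ⟨"firmographics", by simp, h⟩
    · exact ⟨"merged", by simp, h⟩

theorem pvMatched2_iff (pl : List Char) :
    pvMatched pl 2 ↔ (PySem.Chars.isIn "/edgar/detail".toList pl = true ∨
      PySem.Chars.isIn "/edgar/ciks".toList pl = true) := by
  unfold pvMatched pvKwRanks
  constructor
  · rintro ⟨kw, hmem, hin⟩
    simp only [List.mem_cons, List.not_mem_nil, or_false] at hmem
    rcases hmem with h | h | h | h | h | h | h | h <;> injection h with hk hr <;>
      subst hk <;> first | omega | tauto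
  · rintro (h | h)
    · exact ⟨"/edgar/detail", by simp, h⟩
    · exact ⟨"/edgar/ciks", by simp, h⟩

theorem pvMatched3_iff (pl : List Char) :
    pvMatched pl 3 ↔ PySem.Chars.isIn "/sic/".toList pl = true := by
  unfold pvMatched pvKwRanks
  constructor
  · rintro ⟨kw, hmem, hin⟩
    simp only [List.mem_cons, List.not_mem_nil, or_false] at hmem
    rcases hmem with h | h | h | h | h | h | h | h <;> injection h with hk hr <;>
      subst hk <;> omega
  · intro h
    exact ⟨"/sic/", by simp, h⟩

-- the fold computes the minimum matched rank (4 if none)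
theorem pvBest_char (pl : List Char) :
    (pvMatched pl 0 → (pvPairs pl).foldl pvStep 4 = 0) ∧
    (¬ pvMatched pl 0 → pvMatched pl 1 → (pvPairs pl).foldl pvStep 4 = 1) ∧
    (¬ pvMatched pl 0 → ¬ pvMatched pl 1 → pvMatched pl 2 → (pvPairs pl).foldl pvStep 4 = 2) ∧
    (¬ pvMatched pl 0 → ¬ pvMatched pl 1 → ¬ pvMatched pl 2 → pvMatched pl 3 →
      (pvPairs pl).foldl pvStep 4 = 3) ∧
    (¬ pvMatched pl 0 → ¬ pvMatched pl 1 → ¬ pvMatched pl 2 → ¬ pvMatched pl 3 →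
      (pvPairs pl).foldl pvStep 4 = 4) := by
  set v := (pvPairs pl).foldl pvStep 4 with hv
  have origin := pvFoldl_step_origin (pvPairs pl) 4
  rw [← hv] at origin
  have hle : ∀ r, pvMatched pl r → v ≤ r := fun r hr =>
    pvFoldl_step_le_mem _ _ _ ((pvPairs_mem_iff pl r).2 hr)
  have hval : v = 4 ∨ pvMatched pl v := by
    rcases origin with h | ⟨⟨r, c⟩, hx, hc, hveq⟩
    · exact Or.inl h
    · right; subst hc; rw [hveq]; exact (pvPairs_mem_iff pl r).1 hx
  refine ⟨fun h0 => ?_, fun h0 h1 => ?_, fun h0 h1 h2 => ?_, fun h0 h1 h2 h3 => ?_,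
    fun h0 h1 h2 h3 => ?_⟩
  · have := hle 0 h0; omega
  · have hge := hle 1 h1
    interval_cases v
    · exact absurd (by rcases hval with h | h; omega; exact h) h0
    · rfl
  · have hge := hle 2 h2
    interval_cases v
    · exact absurd (by rcases hval with h | h; omega; exact h) h0
    · exact absurd (by rcases hval with h | h; omega; exact h) h1
    · rfl
  · have hge := hle 3 h3
    interval_cases v
    · exact absurd (by rcases hval with h | h; omega; exact h) h0
    · exact absurd (by rcases hval with h | h; omega; exact h) h1
    · exact absurd (by rcases hval with h | h; omega; exact h) h2
    · rfl
  · rcases hval with h | h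
    · exact h
    · have hv4 : v < 4 := pvMatched_rank_lt pl v ((pvPairs_mem_iff pl v).2 h)
      interval_cases v
      · exact absurd h h0
      · exact absurd h h1
      · exact absurd h h2
      · exact absurd h h3

-- ===== VERDICT (by name: the statement is the Claim_ definition above) =====
theorem get_rate_limit_for_path_spec : Claim_equal_get_rate_limit_for_path := by
  intro path _
  unfold Spec_get_rate_limit_for_path
  have hB : get_rate_limit_for_path_alt path
      = pvLimits.getD ((pvPairs (PySem.Str.lower path).toList).foldl pvStep 4) "150/minute" := by
    calc get_rate_limit_for_path_alt path
        = pvLimits.getD ((List.range (PySem.Str.lower path).toList.length).foldl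
            (fun b i => pvKwRanks.foldl
              (fun b kr => if kr.2 < b ∧ pvSW (PySem.Str.lower path).toList i kr.1 then kr.2 else b) b) 4)
            "150/minute" := rfl
      _ = _ := by rw [pvBest_eq_pairs]
  rw [hB]
  obtain ⟨c0, c1, c2, c3, c4⟩ := pvBest_char (PySem.Str.lower path).toList
  have e0 := pvMatched0_iff (PySem.Str.lower path).toList
  have e1 := pvMatched1_iff (PySem.Str.lower path).toList
  have e2 := pvMatched2_iff (PySem.Str.lower path).toList
  have e3 := pvMatched3_iff (PySem.Str.lower path).toList
  unfold get_rate_limit_for_path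
  simp only [List.any_cons, List.any_nil, Bool.or_false, PySem.Str.isIn_eq]
  split_ifs with h0 h1 h2 h3
  · rw [c0 (e0.2 (by simpa using h0))]; rfl
  · rw [c1 (fun m => h0 (by simpa using e0.1 m)) (e1.2 (by simpa using h1))]; rfl
  · rw [c2 (fun m => h0 (by simpa using e0.1 m)) (fun m => h1 (by simpa using e1.1 m))
        (e2.2 (by simpa using h2))]; rfl
  · rw [c3 (fun m => h0 (by simpa using e0.1 m)) (fun m => h1 (by simpa using e1.1 m))
        (fun m => h2 (by simpa using e2.1 m)) (e3.2 (by simpa using h3))]; rfl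
  · rw [c4 (fun m => h0 (by simpa using e0.1 m)) (fun m => h1 (by simpa using e1.1 m))
        (fun m => h2 (by simpa using e2.1 m)) (fun m => h3 (by simpa using e3.1 m))]; rfl
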